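-- pv_equiv track=rewrite | github.com/uzaxirr/agno-docs-mcp | src/agno_docs_mcp/tools/api.py | list_all_resources
-- ===== SOURCE A (Python) =====
-- from typing import Any
--
-- RESOURCE_PATTERNS = {
--     "memory": ["/memories", "/memory_topics", "/user_memory_stats", "/optimize-memories"],
--     "memories": ["/memories", "/memory_topics", "/user_memory_stats", "/optimize-memories"],
--     "agents": ["/agents"],
--     "teams": ["/teams"],
--     "workflows": ["/workflows"],
--     "sessions": ["/sessions"],
--     "knowledge": ["/knowledge", "/content"],
--     "evals": ["/evals", "/evaluation"],
--     "traces": ["/traces", "/spans"],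
--     "metrics": ["/metrics"],
--     "database": ["/database", "/migrate"],
--     "playground": ["/playground"],
-- }
--
-- def list_all_resources(spec: dict[str, Any]) -> str:
--     """List all available API resources."""
--     paths = spec.get("paths", {})
--
--     # Group paths by resource
--     resources: dict[str, list[str]] = {}
--     for path in paths.keys():
--         # Extract resource name from path (first segment)
--         parts = path.strip("/").split("/")
--         if parts:
--             resource = parts[0].replace("_", " ").replace("-", " ").title()
--             if resource not in resources:
--                 resources[resource] = []
--             resources[resource].append(path)
--
--     lines = [
--         "## AgentOS REST API Resources",
--         "",
--         "Available API resources:",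
--         "",
--     ]
--
--     for resource, paths_list in sorted(resources.items()):
--         lines.append(f"### {resource}")
--         for path in sorted(set(paths_list))[:5]:  # Show up to 5 paths per resource
--             lines.append(f"- `{path}`")
--         if len(paths_list) > 5:
--             lines.append(f"- ... and {len(paths_list) - 5} more")
--         lines.append("")
--
--     lines.append("---")
--     lines.append("")
--     lines.append("**Usage:** Call `agno_api(resource=\"memory\")` to get detailed endpoint info.")
--     lines.append("")
--     lines.append("**Available resources:** " + ", ".join(sorted(RESOURCE_PATTERNS.keys())))
--
--     return "\n".join(lines)
-- ===== SOURCE B (Python) =====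
-- RESOURCE_PATTERNS = {
--     "memory": ["/memories", "/memory_topics", "/user_memory_stats", "/optimize-memories"],
--     "memories": ["/memories", "/memory_topics", "/user_memory_stats", "/optimize-memories"],
--     "agents": ["/agents"],
--     "teams": ["/teams"],
--     "workflows": ["/workflows"],
--     "sessions": ["/sessions"],
--     "knowledge": ["/knowledge", "/content"],
--     "evals": ["/evals", "/evaluation"],
--     "traces": ["/traces", "/spans"],
--     "metrics": ["/metrics"],
--     "database": ["/database", "/migrate"],
--     "playground": ["/playground"],
-- }
--
--
-- def _resource_key(path):
--     return path.strip("/").split("/")[0].replace("_", " ").replace("-", " ").title()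
--
--
-- def _section(resource, group):
--     shown = sorted(set(group))[:5]  # show up to 5 paths per resource
--     extra = [f"- ... and {len(group) - 5} more"] if len(group) > 5 else []
--     return [f"### {resource}", *[f"- `{p}`" for p in shown], *extra, ""]
--
--
-- def list_all_resources(spec):
--     """List all available API resources."""
--     paths = list(spec.get("paths", {}).keys())
--     body = [line
--             for key in sorted({_resource_key(p) for p in paths})
--             for line in _section(key, [p for p in paths if _resource_key(p) == key])]
--     return "\n".join([
--         "## AgentOS REST API Resources", "", "Available API resources:", "",
--         *body,
--         "---", "",
--         "**Usage:** Call `agno_api(resource=\"memory\")` to get detailed endpoint info.", "",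
--         "**Available resources:** " + ", ".join(sorted(RESOURCE_PATTERNS.keys())),
--     ])
-- ===== Notes on version B (the rewrite author's own statement) =====
-- stated objective: idiomatic
-- what changed: B drops A's mutable dict-accumulate-then-sort-items grouping and imperative line appends: it computes the sorted distinct resource keys once, builds each group by a direct filter over the path list, and assembles the whole report as one declarative list fed to a single join.
import Mathlib
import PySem

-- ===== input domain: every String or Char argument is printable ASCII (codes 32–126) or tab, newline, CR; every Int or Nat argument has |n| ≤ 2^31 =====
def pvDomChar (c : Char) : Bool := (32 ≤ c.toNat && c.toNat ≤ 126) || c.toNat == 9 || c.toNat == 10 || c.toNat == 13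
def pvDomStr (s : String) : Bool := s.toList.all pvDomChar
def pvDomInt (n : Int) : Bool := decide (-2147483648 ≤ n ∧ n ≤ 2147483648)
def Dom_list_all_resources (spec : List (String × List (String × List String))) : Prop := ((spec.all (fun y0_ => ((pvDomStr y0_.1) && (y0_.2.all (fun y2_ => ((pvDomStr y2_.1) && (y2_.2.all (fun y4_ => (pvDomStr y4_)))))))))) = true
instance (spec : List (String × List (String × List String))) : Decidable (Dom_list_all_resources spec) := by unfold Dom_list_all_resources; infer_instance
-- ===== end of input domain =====

-- B replaces A's mutable dict-accumulate-then-sort grouping by sorted-distinct-keys + per-key filter, assembled declaratively (objective: idiomatic).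
-- B replaces A's mutable dict-accumulate-then-sort grouping by sorted-distinct-keys + per-key filter, assembled declaratively (objective: idiomatic).
-- ===== PORT A =====

-- str.title() on printable ASCII: a letter is uppercased after a non-letter, lowercased after a letter (hand port; exact on the ASCII domain, where 'cased' = alphabetic)
def titleChars : List Char → Bool → List Char
  | [], _ => []
  | c :: rest, prevAlpha =>
    (if PySem.Chars.isalpha c then
        (if prevAlpha then PySem.Chars.lowerChar c else PySem.Chars.upperChar c)
      else c) :: titleChars rest (PySem.Chars.isalpha c)

-- module constant RESOURCE_PATTERNS
def RESOURCE_PATTERNS : PySem.Dict String (List String) := PySem.Dict.ofList [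
  ("memory", ["/memories", "/memory_topics", "/user_memory_stats", "/optimize-memories"]),
  ("memories", ["/memories", "/memory_topics", "/user_memory_stats", "/optimize-memories"]),
  ("agents", ["/agents"]),
  ("teams", ["/teams"]),
  ("workflows", ["/workflows"]),
  ("sessions", ["/sessions"]),
  ("knowledge", ["/knowledge", "/content"]),
  ("evals", ["/evals", "/evaluation"]),
  ("traces", ["/traces", "/spans"]),
  ("metrics", ["/metrics"]),
  ("database", ["/database", "/migrate"]),
  ("playground", ["/playground"])]

-- path.strip("/").split("/")[0].replace("_"," ").replace("-"," ").title()  (parts is never empty, so Python's 'if parts:' always fires; headD ports parts[0])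
def resourceKey (path : String) : String :=
  String.ofList (titleChars (PySem.Chars.replace (PySem.Chars.replace
    ((PySem.Chars.splitOn (PySem.Chars.stripChars path.toList ['/']) ['/']).headD [])
    ['_'] [' ']) ['-'] [' ']) false)

-- spec.get("paths", {}).keys(): first-match lookup per the dict convention; keys() = first occurrences
def pathKeys (spec : List (String × List (String × List String))) : List String :=
  PySem.List.dedup ((((spec.find? (fun kv => kv.1 == "paths")).map (·.2)).getD []).map (·.1))

def list_all_resources (spec : List (String × List (String × List String))) : String :=
  let paths := pathKeys spec
  let resources : PySem.Dict String (List String) :=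
    paths.foldl (fun d path =>
      let resource := resourceKey path
      -- 'if resource not in resources: resources[resource] = []' then '.append(path)'
      let d := if d.contains resource then d else d.insert resource []
      d.modify resource [] (fun l => l ++ [path])) PySem.Dict.empty
  let lines := ["## AgentOS REST API Resources", "", "Available API resources:", ""]
  -- sorted(resources.items()): keys are unique, so Python's tuple order never reaches the second component; ported with key = fst
  let lines := (PySem.List.sorted resources.items (fun kv => kv.1) false).foldl
    (fun lines kv =>
      let lines := lines ++ ["### " ++ kv.1]
      let lines := (PySem.List.slice (PySem.List.sorted (PySem.Set.ofList kv.2) (fun x => x) false) none (some 5)).foldl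
        (fun lines p => lines ++ ["- `" ++ p ++ "`"]) lines
      let lines := if 5 < kv.2.length then
          lines ++ ["- ... and " ++ PySem.Int.toStr ((kv.2.length : Int) - 5) ++ " more"]
        else lines
      lines ++ [""]) lines
  let lines := lines ++ ["---", "",
    "**Usage:** Call `agno_api(resource=\"memory\")` to get detailed endpoint info.", "",
    "**Available resources:** " ++ PySem.Str.join ", " (PySem.List.sorted RESOURCE_PATTERNS.keys (fun x => x) false)]
  PySem.Str.join "\n" lines

-- ===== PORT B =====

-- _section(resource, group)
def sectionLines (resource : String) (group : List String) : List String :=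
  let shown := PySem.List.slice (PySem.List.sorted (PySem.Set.ofList group) (fun x => x) false) none (some 5)
  let extra := if 5 < group.length then
      ["- ... and " ++ PySem.Int.toStr ((group.length : Int) - 5) ++ " more"]
    else []
  ["### " ++ resource] ++ shown.map (fun p => "- `" ++ p ++ "`") ++ extra ++ [""]

def list_all_resources_alt (spec : List (String × List (String × List String))) : String :=
  let paths := pathKeys spec
  let body := (PySem.List.sorted (PySem.Set.ofList (paths.map resourceKey)) (fun x => x) false).flatMap
    (fun key => sectionLines key (paths.filter (fun p => resourceKey p == key)))
  PySem.Str.join "\n"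
    (["## AgentOS REST API Resources", "", "Available API resources:", ""] ++ body ++
     ["---", "",
      "**Usage:** Call `agno_api(resource=\"memory\")` to get detailed endpoint info.", "",
      "**Available resources:** " ++ PySem.Str.join ", " (PySem.List.sorted RESOURCE_PATTERNS.keys (fun x => x) false)])

-- ===== PRECONDITION & SPEC =====
def Spec_list_all_resources (spec : List (String × List (String × List String))) (out : String) : Prop := out = list_all_resources_alt spec
instance (spec : List (String × List (String × List String))) (out : String) : Decidable (Spec_list_all_resources spec out) := by unfold Spec_list_all_resources; infer_instance

-- ===== CLAIM (what is proved, stated in full; the proofs are below) =====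
def Claim_equal_list_all_resources : Prop := ∀ (spec : List (String × List (String × List String))), Dom_list_all_resources spec → Spec_list_all_resources spec (list_all_resources spec)

-- ===== LEMMAS AND PROOFS =====

lemma ensure_modify {κ ν : Type} [BEq κ] [LawfulBEq κ] (d : PySem.Dict κ (List ν)) (k : κ) (v : ν) :
    ((if d.contains k then d else d.insert k []).modify k [] (fun l => l ++ [v]))
      = d.modify k [] (fun l => l ++ [v]) := by
  by_cases h : d.contains k
  · simp [h]
  · have h' : d.contains k = false := by simpa using h
    simp [h', PySem.Dict.modify, PySem.Dict.getD_insert_self,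
      PySem.Dict.insert_insert_self, PySem.Dict.getD_of_not_contains d [] h']

lemma fold_pairs (paths : List String) :
    paths.foldl (fun d path => d.modify (resourceKey path) [] (fun l => l ++ [path])) PySem.Dict.empty
      = (paths.map (fun p => (resourceKey p, p))).foldl
          (fun d q => d.modify q.1 [] (fun l => l ++ [q.2])) PySem.Dict.empty := by
  rw [List.foldl_map]

lemma outer_fold (l : List (String × List String)) (init : List String) :
    l.foldl (fun lines kv =>
      (if 5 < kv.2.length then
          ((PySem.List.slice (PySem.List.sorted (PySem.Set.ofList kv.2) (fun x => x) false) none (some 5)).foldl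
            (fun lines p => lines ++ ["- `" ++ p ++ "`"]) (lines ++ ["### " ++ kv.1])) ++
          ["- ... and " ++ PySem.Int.toStr ((kv.2.length : Int) - 5) ++ " more"]
        else
          ((PySem.List.slice (PySem.List.sorted (PySem.Set.ofList kv.2) (fun x => x) false) none (some 5)).foldl
            (fun lines p => lines ++ ["- `" ++ p ++ "`"]) (lines ++ ["### " ++ kv.1]))) ++ [""]) init
    = init ++ l.flatMap (fun kv => sectionLines kv.1 kv.2) := by
  have hb : ∀ (lines : List String) (kv : String × List String),
      ((if 5 < kv.2.length then
          ((PySem.List.slice (PySem.List.sorted (PySem.Set.ofList kv.2) (fun x => x) false) none (some 5)).foldl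
            (fun lines p => lines ++ ["- `" ++ p ++ "`"]) (lines ++ ["### " ++ kv.1])) ++
          ["- ... and " ++ PySem.Int.toStr ((kv.2.length : Int) - 5) ++ " more"]
        else
          ((PySem.List.slice (PySem.List.sorted (PySem.Set.ofList kv.2) (fun x => x) false) none (some 5)).foldl
            (fun lines p => lines ++ ["- `" ++ p ++ "`"]) (lines ++ ["### " ++ kv.1]))) ++ [""])
      = lines ++ sectionLines kv.1 kv.2 := by
    intro lines kv
    rw [PySem.List.foldl_append_singleton_eq_map]
    unfold sectionLines
    split_ifs <;> simp [List.append_assoc]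
  calc l.foldl _ init = l.foldl (fun lines kv => lines ++ sectionLines kv.1 kv.2) init := by
        congr 1
        funext lines kv
        exact hb lines kv
    _ = init ++ l.flatMap (fun kv => sectionLines kv.1 kv.2) := by
        rw [PySem.List.foldl_append_eq_flatMap]

theorem main_eq : ∀ (spec : List (String × List (String × List String))),
    list_all_resources spec = list_all_resources_alt spec := by
  intro spec
  unfold list_all_resources list_all_resources_alt
  simp only [ensure_modify]
  set paths := pathKeys spec with hp
  set d := paths.foldl (fun d path => d.modify (resourceKey path) [] (fun l => l ++ [path])) PySem.Dict.empty with hdd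
  have hkeys : d.keys = PySem.Set.ofList (paths.map resourceKey) := by
    rw [hdd, PySem.Dict.keys_foldl_modify_key]
    rfl
  have hnodup : d.keys.Nodup := by
    rw [hdd]
    exact PySem.Dict.nodup_keys_foldl_modify_key _ _ _ _ _ (by simp [PySem.Dict.empty])
  have hgetD : ∀ k, d.getD k [] = paths.filter (fun p => resourceKey p == k) := by
    intro k
    rw [hdd, fold_pairs, PySem.Dict.getD_foldl_modify_append]
    simp [List.filter_map, List.map_map, Function.comp_def]
  have hsorted : PySem.List.sorted d.items (fun kv => kv.1) false
      = (PySem.List.sorted (PySem.Set.ofList (paths.map resourceKey)) (fun x => x) false).map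
          (fun k => (k, d.getD k [])) := by
    apply PySem.List.sorted_eq_of_perm_of_pairwise_lt
    · rw [PySem.Dict.items_eq_map_keys d hnodup [], hkeys]
      exact (PySem.List.sorted_perm _ _ _).map _
    · rw [List.pairwise_map]
      exact PySem.List.sorted_ofList_pairwise_lt (paths.map resourceKey)
  rw [hsorted, outer_fold]
  simp only [List.flatMap_map, hgetD]

-- ===== VERDICT (by name: the statement is the Claim_ definition above) =====
theorem list_all_resources_spec : Claim_equal_list_all_resources := by
  intro spec _
  unfold Spec_list_all_resources
  exact main_eq spec
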